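-- pv_equiv track=rewrite | github.com/tycyd/codeforces | 1402A Fancy Fence.py | fancy_fence
-- ===== SOURCE A (Python) =====
-- def fancy_fence(N, h_a, w_a):
--     MOD = 10**9 + 7
--     res = 0
--     st = []
--     for i in range(N):
--         h = h_a[i]
--         w = w_a[i]
--
--         res += calc(h) * calc(w)
--         res %= MOD
--
--         lw = 0
--         prw = 0
--         while st and st[-1][0] > h:
--             ph, pw, plw = st.pop()
--             lw += pw
--
--             sr = 0
--             sr += plw * pw
--             sr %= MOD
--             sr += pw * prw
--             sr %= MOD
--             sr += plw * prw
--             sr %= MOD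
--             sr *= ph
--             res += sr
--             res %= MOD
--
--             prw += pw
--
--         st.append([h, w, lw])
--
--     prw = 0
--     while st:
--         ph, pw, plw = st.pop()
--         sr = 0
--         sr += plw * pw
--         sr %= MOD
--         sr += pw * prw
--         sr %= MOD
--         sr += plw * prw
--         sr %= MOD
--         sr *= ph
--         res += sr
--         res %= MOD
--
--         prw += pw
--
--     return res
--
-- def calc(v):
--     return (v+1)*v//2
-- ===== SOURCE B (Python) =====
-- def calc(v):
--     return (v + 1) * v // 2
--
--
-- def fancy_fence(N, h_a, w_a):
--     MOD = 10**9 + 7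
--     h = [h_a[i] for i in range(N)]
--     w = [w_a[i] for i in range(N)]
--     n = len(h)
--     # pse[i]: rightmost j < i with h[j] <= h[i], else -1 (found by pointer jumps)
--     pse = []
--     for i in range(n):
--         j = i - 1
--         while j >= 0 and h[j] > h[i]:
--             j = pse[j]
--         pse.append(j)
--     # nse[i]: leftmost t > i with h[t] < h[i], else n (found by pointer jumps)
--     nse = [0] * n
--     for i in range(n - 1, -1, -1):
--         t = i + 1
--         while t < n and h[t] >= h[i]:
--             t = nse[t]
--         nse[i] = t
--     # cumw[i]: total width along the chain i, pse[i], pse[pse[i]], ...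
--     cumw = []
--     for i in range(n):
--         cumw.append(w[i] + (cumw[pse[i]] if pse[i] >= 0 else 0))
--     res = 0
--     for i in range(n):
--         lw = (cumw[i - 1] if i > 0 else 0) - (cumw[pse[i]] if pse[i] >= 0 else 0)
--         rw = (cumw[nse[i] - 1] if nse[i] > 0 else 0) - cumw[i]
--         res += calc(h[i]) * calc(w[i]) + h[i] * (lw * w[i] + w[i] * rw + lw * rw)
--     return res % MOD
-- ===== Notes on version B (the rewrite author's own statement) =====
-- stated objective: alternative
-- what changed: Replaces A's left-to-right monotonic stack (in-loop pops accumulating contributions) by per-index closed formulas: previous-smaller-or-equal and next-smaller pointer arrays built by pointer jumping, chain-cumulated widths, and one direct pass summing each board's contribution from those arrays.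
import Mathlib
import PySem

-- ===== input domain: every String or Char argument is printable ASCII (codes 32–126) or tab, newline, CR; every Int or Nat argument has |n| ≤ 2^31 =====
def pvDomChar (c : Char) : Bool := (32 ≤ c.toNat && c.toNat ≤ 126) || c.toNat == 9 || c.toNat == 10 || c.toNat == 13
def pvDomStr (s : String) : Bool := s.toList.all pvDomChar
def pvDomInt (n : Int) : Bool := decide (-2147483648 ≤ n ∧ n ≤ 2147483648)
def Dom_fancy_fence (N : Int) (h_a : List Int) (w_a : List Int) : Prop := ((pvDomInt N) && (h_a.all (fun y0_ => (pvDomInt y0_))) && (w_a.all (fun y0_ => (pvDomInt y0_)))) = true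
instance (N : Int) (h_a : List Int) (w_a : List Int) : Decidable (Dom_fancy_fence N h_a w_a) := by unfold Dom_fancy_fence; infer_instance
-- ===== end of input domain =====

-- B replaces A's monotonic stack by per-index closed formulas: previous-smaller-or-equal and
-- next-smaller pointers found by pointer jumping, chain-cumulated widths, and one direct sum.

-- ===== PORT A =====
def pvCalc (v : Int) : Int := PySem.Int.floordiv ((v + 1) * v) 2

/-- A's inner `while st and st[-1][0] > h` pop loop (stack head = Python list end).
State: (st, res, lw, prw); entries are (ph, pw, plw). -/
def pvPopA (MOD h : Int) : List (Int × Int × Int) → Int → Int → Int → (List (Int × Int × Int) × Int × Int × Int)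
  | [], res, lw, prw => ([], res, lw, prw)
  | e :: rest, res, lw, prw =>
    if e.1 > h then
      let lw' := lw + e.2.1
      let sr := PySem.Int.mod (0 + e.2.2 * e.2.1) MOD
      let sr := PySem.Int.mod (sr + e.2.1 * prw) MOD
      let sr := PySem.Int.mod (sr + e.2.2 * prw) MOD
      let sr := sr * e.1
      pvPopA MOD h rest (PySem.Int.mod (res + sr) MOD) lw' (prw + e.2.1)
    else (e :: rest, res, lw, prw)

/-- A's final `while st` drain loop. -/
def pvFinalA (MOD : Int) : List (Int × Int × Int) → Int → Int → Int
  | [], res, _ => res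
  | e :: rest, res, prw =>
    let sr := PySem.Int.mod (0 + e.2.2 * e.2.1) MOD
    let sr := PySem.Int.mod (sr + e.2.1 * prw) MOD
    let sr := PySem.Int.mod (sr + e.2.2 * prw) MOD
    let sr := sr * e.1
    pvFinalA MOD rest (PySem.Int.mod (res + sr) MOD) (prw + e.2.1)

def fancy_fence (N : Int) (h_a : List Int) (w_a : List Int) : Int :=
  let MOD : Int := 10 ^ 9 + 7
  let s := (PySem.List.pyRange 0 N 1).foldl (fun (s : Int × List (Int × Int × Int)) i =>
    let h := PySem.List.pyGetD h_a i 0   -- h_a[i]; IndexError excluded by Pre_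
    let w := PySem.List.pyGetD w_a i 0   -- w_a[i]; IndexError excluded by Pre_
    let res := PySem.Int.mod (s.1 + pvCalc h * pvCalc w) MOD
    let t := pvPopA MOD h s.2 res 0 0
    (t.2.1, (h, w, t.2.2.1) :: t.1)) (0, [])
  pvFinalA MOD s.2 s.1 0

-- ===== PORT B =====
/-- Source B's `while j >= 0 and h[j] > h[i]: j = pse[j]` pointer jumps. The jump target strictly
decreases, so `h.length + 2` fuel is never exhausted. -/
def pvJumpDown (h pse : List Int) (hi : Int) : Nat → Int → Int
  | 0, j => j
  | fuel + 1, j =>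
    if 0 ≤ j ∧ PySem.List.pyGetD h j 0 > hi then pvJumpDown h pse hi fuel (PySem.List.pyGetD pse j 0) else j

/-- Source B's `while t < n and h[t] >= h[i]: t = nse[t]` pointer jumps (t strictly increases). -/
def pvJumpUp (h nse : List Int) (n hi : Int) : Nat → Int → Int
  | 0, t => t
  | fuel + 1, t =>
    if t < n ∧ PySem.List.pyGetD h t 0 ≥ hi then pvJumpUp h nse n hi fuel (PySem.List.pyGetD nse t 0) else t

def fancy_fence_alt (N : Int) (h_a : List Int) (w_a : List Int) : Int :=
  let MOD : Int := 10 ^ 9 + 7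
  let h := (PySem.List.pyRange 0 N 1).map (fun i => PySem.List.pyGetD h_a i 0)  -- h_a[i]; IndexError excluded by Pre_
  let w := (PySem.List.pyRange 0 N 1).map (fun i => PySem.List.pyGetD w_a i 0)
  let n : Int := h.length
  let pse := (PySem.List.pyRange 0 n 1).foldl (fun pse i =>
      pse ++ [pvJumpDown h pse (PySem.List.pyGetD h i 0) (h.length + 2) (i - 1)]) []
  let nse := (PySem.List.pyRange (n - 1) (-1) (-1)).foldl (fun nse i =>
      PySem.List.pySetD nse i (pvJumpUp h nse n (PySem.List.pyGetD h i 0) (h.length + 2) (i + 1)))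
    (List.replicate h.length 0)
  let cumw := (PySem.List.pyRange 0 n 1).foldl (fun cumw i =>
      cumw ++ [PySem.List.pyGetD w i 0 +
        (if PySem.List.pyGetD pse i 0 ≥ 0 then PySem.List.pyGetD cumw (PySem.List.pyGetD pse i 0) 0 else 0)]) []
  let res := (PySem.List.pyRange 0 n 1).foldl (fun res i =>
      let lw := (if i > 0 then PySem.List.pyGetD cumw (i - 1) 0 else 0) -
        (if PySem.List.pyGetD pse i 0 ≥ 0 then PySem.List.pyGetD cumw (PySem.List.pyGetD pse i 0) 0 else 0)
      let rw := (if PySem.List.pyGetD nse i 0 > 0 then PySem.List.pyGetD cumw (PySem.List.pyGetD nse i 0 - 1) 0 else 0) -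
        PySem.List.pyGetD cumw i 0
      res + pvCalc (PySem.List.pyGetD h i 0) * pvCalc (PySem.List.pyGetD w i 0) +
        PySem.List.pyGetD h i 0 * (lw * PySem.List.pyGetD w i 0 + PySem.List.pyGetD w i 0 * rw + lw * rw)) 0
  PySem.Int.mod res MOD

-- ===== PRECONDITION & SPEC =====
-- Pre_ excludes exactly the inputs where Python A raises IndexError: N boards are read, so both
-- lists must have at least N elements (negative N reads none and is fine).
def Pre_fancy_fence (N : Int) (h_a : List Int) (w_a : List Int) : Prop :=
  N ≤ (h_a.length : Int) ∧ N ≤ (w_a.length : Int)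
instance (N : Int) (h_a : List Int) (w_a : List Int) : Decidable (Pre_fancy_fence N h_a w_a) := by
  unfold Pre_fancy_fence; infer_instance
def pvWitness_fancy_fence : Int × List Int × List Int := (3, [3, 2, 1], [1, 1, 1])

def Spec_fancy_fence (N : Int) (h_a : List Int) (w_a : List Int) (out : Int) : Prop := out = fancy_fence_alt N h_a w_a
instance (N : Int) (h_a : List Int) (w_a : List Int) (out : Int) : Decidable (Spec_fancy_fence N h_a w_a out) := by unfold Spec_fancy_fence; infer_instance

-- ===== CLAIM (what is proved, stated in full; the proofs are below) =====
def Claim_equal_fancy_fence : Prop := ∀ (N : Int) (h_a : List Int) (w_a : List Int), Dom_fancy_fence N h_a w_a → Pre_fancy_fence N h_a w_a → Spec_fancy_fence N h_a w_a (fancy_fence N h_a w_a)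

-- ===== LEMMAS AND PROOFS =====
-- ===== reference layer: closed-form stack/pointer characterizations =====

/-- largest `j < k` with `hf j ≤ x`, as an Int; `-1` if none. -/
def prevLE (hf : Nat → Int) (x : Int) : Nat → Int
  | 0 => -1
  | k + 1 => if hf k ≤ x then (k : Int) else prevLE hf x k

def pseR (hf : Nat → Int) (i : Nat) : Int := prevLE hf (hf i) i

/-- first `t` with `t₀ ≤ t < t₀ + m` and `hf t < x`, else `t₀ + m`. -/
def nextLT (hf : Nat → Int) (x : Int) : Nat → Nat → Nat
  | t, 0 => t
  | t, m + 1 => if hf t < x then t else nextLT hf x (t + 1) m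

def nseR (hf : Nat → Int) (n i : Nat) : Nat := nextLT hf (hf i) (i + 1) (n - (i + 1))

theorem prevLE_neg_one_le (hf : Nat → Int) (x : Int) (k : Nat) : -1 ≤ prevLE hf x k := by
  induction k with
  | zero => simp [prevLE]
  | succ k ih => unfold prevLE; split <;> omega

theorem prevLE_lt (hf : Nat → Int) (x : Int) (k : Nat) : prevLE hf x k < (k : Int) := by
  induction k with
  | zero => simp [prevLE]
  | succ k ih => unfold prevLE; split <;> push_cast <;> omega

theorem pseR_lt (hf : Nat → Int) (i : Nat) : pseR hf i < (i : Int) := prevLE_lt hf (hf i) i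

theorem prevLE_le (hf : Nat → Int) (x : Int) (k : Nat) (h : 0 ≤ prevLE hf x k) :
    hf (prevLE hf x k).toNat ≤ x := by
  induction k with
  | zero => simp [prevLE] at h
  | succ k ih =>
    by_cases hc : hf k ≤ x <;> simp only [prevLE, hc, if_true, if_false] at h ⊢
    · simpa using hc
    · exact ih h

theorem prevLE_gt (hf : Nat → Int) (x : Int) (k : Nat) (m : Nat) (h1 : prevLE hf x k < m) (h2 : m < k) :
    x < hf m := by
  induction k with
  | zero => omega
  | succ k ih =>
    simp only [prevLE] at h1
    split at h1 <;> rename_i hc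
    · omega
    · rcases Nat.lt_succ_iff_lt_or_eq.mp h2 with h | h
      · exact ih h1 h
      · subst h; omega

/-- uniqueness: anything with the three properties is `prevLE`. -/
theorem prevLE_eq_of (hf : Nat → Int) (x : Int) (k : Nat) (j : Int)
    (hlo : -1 ≤ j) (hhi : j < k)
    (hle : 0 ≤ j → hf j.toNat ≤ x)
    (hgt : ∀ m : Nat, j < m → m < k → x < hf m) :
    prevLE hf x k = j := by
  induction k with
  | zero => simp only [prevLE]; omega
  | succ k ih =>
    simp only [prevLE]
    split <;> rename_i hc
    · -- hf k ≤ x: j must be k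
      by_contra hne
      have hjk : j < (k : Int) := by omega
      exact absurd (hgt k (by omega) (by omega)) (by omega)
    · -- hf k > x: recurse
      have hjk : j < (k : Int) := by
        by_contra hge
        have hj : j = (k : Int) := by omega
        have h2 := hle (by omega)
        rw [hj] at h2; simp at h2; exact hc h2
      exact ih hjk (fun m hm1 hm2 => hgt m hm1 (by omega))

theorem nextLT_lb (hf : Nat → Int) (x : Int) (t m : Nat) : t ≤ nextLT hf x t m := by
  induction m generalizing t with
  | zero => simp [nextLT]
  | succ m ih => simp only [nextLT]; split; · omega
                 · exact le_trans (by omega) (ih (t + 1))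

theorem nextLT_ub (hf : Nat → Int) (x : Int) (t m : Nat) : nextLT hf x t m ≤ t + m := by
  induction m generalizing t with
  | zero => simp [nextLT]
  | succ m ih => simp only [nextLT]; split; · omega
                 · exact le_trans (ih (t + 1)) (by omega)

theorem nextLT_lt (hf : Nat → Int) (x : Int) (t m : Nat) (h : nextLT hf x t m < t + m) :
    hf (nextLT hf x t m) < x := by
  induction m generalizing t with
  | zero => simp [nextLT] at h
  | succ m ih =>
    simp only [nextLT] at h ⊢
    split at h <;> rename_i hc
    · rw [if_pos hc]; exact hc
    · rw [if_neg hc]; exact ih (t + 1) (by omega)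

theorem nextLT_ge (hf : Nat → Int) (x : Int) (t m : Nat) (s : Nat) (h1 : t ≤ s) (h2 : s < nextLT hf x t m) :
    x ≤ hf s := by
  induction m generalizing t with
  | zero => simp [nextLT] at h2; omega
  | succ m ih =>
    simp only [nextLT] at h2
    split at h2 <;> rename_i hc
    · omega
    · rcases Nat.eq_or_lt_of_le h1 with h | h
      · subst h; omega
      · exact ih (t + 1) h h2

theorem nextLT_eq_of (hf : Nat → Int) (x : Int) (t m : Nat) (s : Nat)
    (h1 : t ≤ s) (h2 : s ≤ t + m)
    (hlt : s < t + m → hf s < x)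
    (hge : ∀ r, t ≤ r → r < s → x ≤ hf r) :
    nextLT hf x t m = s := by
  induction m generalizing t with
  | zero => simp [nextLT]; omega
  | succ m ih =>
    simp only [nextLT]
    split <;> rename_i hc
    · -- hf t < x: s must be t
      by_contra hne
      exact absurd (hge t (le_refl t) (by omega)) (by omega)
    · have hts : t < s := by
        rcases Nat.eq_or_lt_of_le h1 with h | h
        · exfalso; subst h; exact hc (hlt (by omega))
        · exact h
      exact ih (t + 1) hts (by omega) (by intro hs; exact hlt (by omega)) (fun r hr1 hr2 => hge r (by omega) hr2)

/-- total width along the chain `i, pse i, pse (pse i), …` -/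
def cwR (hf wf : Nat → Int) (i : Nat) : Int :=
  wf i + (if _h : 0 ≤ pseR hf i then cwR hf wf (pseR hf i).toNat else 0)
decreasing_by
  have := pseR_lt hf i; omega

/-- A's stack (top first, as index list) after processing boards `0..i-1`. -/
def stkR (hf : Nat → Int) : Nat → List Nat
  | 0 => []
  | i + 1 => i :: (stkR hf i).dropWhile (fun j => decide (hf i < hf j))

def totw (wf : Nat → Int) (l : List Nat) : Int := (l.map wf).sum

theorem mem_stkR_lt (hf : Nat → Int) (i : Nat) (j : Nat) (h : j ∈ stkR hf i) : j < i := by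
  induction i with
  | zero => simp [stkR] at h
  | succ i ih =>
    simp only [stkR, List.mem_cons] at h
    rcases h with h | h
    · omega
    · exact lt_trans (ih ((List.dropWhile_sublist _).subset h)) (by omega)

theorem stkR_pairwise (hf : Nat → Int) (i : Nat) :
    (stkR hf i).Pairwise (fun a b => b < a ∧ hf b ≤ hf a) := by
  induction i with
  | zero => simp [stkR]
  | succ i ih =>
    simp only [stkR]
    refine List.Pairwise.cons ?_ (List.Pairwise.sublist (List.dropWhile_sublist _) ih)
    intro b hb
    constructor
    · exact mem_stkR_lt hf i b ((List.dropWhile_sublist _).subset hb)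
    · -- height of every survivor is ≤ hf i
      -- first survivor fails the predicate; deeper ones are ≤ it by pairwise
      have hd := List.head?_dropWhile_not (p := fun j => decide (hf i < hf j)) (l := stkR hf i)
      cases hD : (stkR hf i).dropWhile (fun j => decide (hf i < hf j)) with
      | nil => simp [hD] at hb
      | cons a l =>
        have ha : ¬ (hf i < hf a) := by
          have := hd; rw [hD] at this; simpa using this
        rw [hD] at hb
        rcases List.mem_cons.mp hb with h | h
        · subst h; omega
        · -- b deeper than a
          have hsub : (a :: l).Pairwise (fun a b => b < a ∧ hf b ≤ hf a) := by
            rw [← hD]; exact List.Pairwise.sublist (List.dropWhile_sublist _) ih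
          have := (List.pairwise_cons.mp hsub).1 b h
          omega

theorem stkR_sorted_gt (hf : Nat → Int) (i : Nat) : (stkR hf i).Pairwise (· > ·) :=
  (stkR_pairwise hf i).imp (fun h => h.1)

theorem stkR_nodup (hf : Nat → Int) (i : Nat) : (stkR hf i).Nodup :=
  (stkR_sorted_gt hf i).imp (fun h => Nat.ne_of_gt h)

theorem dropWhile_eq_filter_of_antitone (hf : Nat → Int) (x : Int) (l : List Nat)
    (hp : l.Pairwise (fun a b => hf b ≤ hf a)) :
    l.dropWhile (fun j => decide (x < hf j)) = l.filter (fun j => decide (hf j ≤ x)) := by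
  induction l with
  | nil => rfl
  | cons a l ih =>
    rcases List.pairwise_cons.mp hp with ⟨ha, hl⟩
    by_cases hc : x < hf a
    · rw [List.dropWhile_cons_of_pos (by simpa using hc), List.filter_cons_of_neg (by simpa using hc)]
      exact ih hl
    · rw [List.dropWhile_cons_of_neg (by simpa using hc), List.filter_cons_of_pos (by simpa using hc)]
      congr 1
      exact (List.filter_eq_self.mpr (fun b hb => by simpa using le_trans (ha b hb) (by omega))).symm

theorem mem_stkR (hf : Nat → Int) (i : Nat) (j : Nat) :
    j ∈ stkR hf i ↔ j < i ∧ ∀ k, j < k → k < i → hf j ≤ hf k := by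
  induction i with
  | zero => simp [stkR]
  | succ i ih =>
    simp only [stkR, List.mem_cons]
    rw [dropWhile_eq_filter_of_antitone hf (hf i) _ ((stkR_pairwise hf i).imp (fun h => h.2))]
    simp only [List.mem_filter, ih, decide_eq_true_eq]
    constructor
    · rintro (rfl | ⟨⟨hj, hall⟩, hle⟩)
      · exact ⟨by omega, fun k h1 h2 => by omega⟩
      · refine ⟨by omega, fun k h1 h2 => ?_⟩
        rcases Nat.lt_succ_iff_lt_or_eq.mp h2 with h | h
        · exact hall k h1 h
        · subst h; exact hle
    · rintro ⟨hj, hall⟩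
      rcases Nat.lt_succ_iff_lt_or_eq.mp hj with h | h
      · exact Or.inr ⟨⟨h, fun k h1 h2 => hall k h1 (by omega)⟩, hall i h (by omega)⟩
      · exact Or.inl h

theorem eq_of_sorted_gt_ext (l1 l2 : List Nat) (h1 : l1.Pairwise (· > ·)) (h2 : l2.Pairwise (· > ·))
    (hm : ∀ a, a ∈ l1 ↔ a ∈ l2) : l1 = l2 :=
  List.Perm.eq_of_pairwise (le := (· > ·))
    (fun _ _ _ _ hab hba => by omega) h1 h2
    ((List.perm_ext_iff_of_nodup (h1.imp Nat.ne_of_gt) (h2.imp Nat.ne_of_gt)).mpr hm)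

theorem drop_stkR_neg (hf : Nat → Int) (i : Nat) (hp : pseR hf i < 0) :
    (stkR hf i).dropWhile (fun j => decide (hf i < hf j)) = [] := by
  rw [dropWhile_eq_filter_of_antitone hf (hf i) _ ((stkR_pairwise hf i).imp (fun h => h.2))]
  rw [List.filter_eq_nil_iff]
  intro j hj
  have hlt := mem_stkR_lt hf i j hj
  have := prevLE_gt hf (hf i) i j (by unfold pseR at hp; omega) hlt
  simpa using this

theorem drop_stkR_pos (hf : Nat → Int) (i : Nat) (hp : 0 ≤ pseR hf i) :
    (stkR hf i).dropWhile (fun j => decide (hf i < hf j)) = stkR hf ((pseR hf i).toNat + 1) := by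
  have hplt : pseR hf i < (i : Int) := pseR_lt hf i
  have hple : hf (pseR hf i).toNat ≤ hf i := prevLE_le hf (hf i) i hp
  have hpgt : ∀ m : Nat, pseR hf i < m → m < i → hf i < hf m := fun m h1 h2 => prevLE_gt hf (hf i) i m h1 h2
  apply eq_of_sorted_gt_ext
  · exact (stkR_sorted_gt hf i).sublist (List.dropWhile_sublist _)
  · exact stkR_sorted_gt hf _
  · intro a
    rw [dropWhile_eq_filter_of_antitone hf (hf i) _ ((stkR_pairwise hf i).imp (fun h => h.2))]
    simp only [List.mem_filter, mem_stkR, decide_eq_true_eq]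
    constructor
    · rintro ⟨⟨ha, hall⟩, hle⟩
      have hax : (a : Int) ≤ pseR hf i := by
        by_contra hgt
        exact absurd (hpgt a (by omega) ha) (by omega)
      refine ⟨by omega, fun k h1 h2 => ?_⟩
      exact hall k h1 (by omega)
    · rintro ⟨ha, hall⟩
      have halei : a ≤ (pseR hf i).toNat := by omega
      have hfa_le : hf a ≤ hf i := by
        rcases Nat.eq_or_lt_of_le halei with h | h
        · subst h; exact hple
        · exact le_trans (hall (pseR hf i).toNat h (by omega)) hple
      refine ⟨⟨by omega, fun k h1 h2 => ?_⟩, hfa_le⟩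
      rcases Nat.lt_or_ge k ((pseR hf i).toNat + 1) with h | h
      · exact hall k h1 h
      · exact le_trans hfa_le (le_of_lt (hpgt k (by omega) h2))

theorem stkR_suffix (hf : Nat → Int) (i : Nat) :
    ∀ j ∈ stkR hf i, ∃ pre, stkR hf i = pre ++ stkR hf (j + 1) := by
  induction i using Nat.strong_induction_on with
  | _ i ih =>
    match i with
    | 0 => intro j hj; simp [stkR] at hj
    | i + 1 =>
      intro j hj
      rcases List.mem_cons.mp (by simpa [stkR] using hj) with h | h
      · subst h; exact ⟨[], rfl⟩
      · rcases lt_or_ge (pseR hf i) 0 with hp | hp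
        · rw [drop_stkR_neg hf i hp] at h; simp at h
        · rw [drop_stkR_pos hf i hp] at h
          have hplt : ((pseR hf i).toNat + 1) < i + 1 := by have := pseR_lt hf i; omega
          obtain ⟨pre, hpre⟩ := ih _ hplt j h
          refine ⟨i :: pre, ?_⟩
          have hs : stkR hf (i + 1) = i :: stkR hf ((pseR hf i).toNat + 1) := by
            rw [show stkR hf (i + 1) = i :: (stkR hf i).dropWhile (fun k => decide (hf i < hf k)) from rfl,
              drop_stkR_pos hf i hp]
          rw [hs, hpre, List.cons_append]

theorem totw_stkR (hf wf : Nat → Int) (j : Nat) : totw wf (stkR hf (j + 1)) = cwR hf wf j := by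
  induction j using Nat.strong_induction_on with
  | _ j ih =>
    rw [cwR]
    rcases lt_or_ge (pseR hf j) 0 with hp | hp
    · rw [dif_neg (by omega)]
      simp [stkR, totw, drop_stkR_neg hf j hp]
    · rw [dif_pos hp]
      have hplt : (pseR hf j).toNat < j := by have := pseR_lt hf j; omega
      have hs : stkR hf (j + 1) = j :: stkR hf ((pseR hf j).toNat + 1) := by
        rw [show stkR hf (j + 1) = j :: (stkR hf j).dropWhile (fun k => decide (hf j < hf k)) from rfl,
          drop_stkR_pos hf j hp]
      rw [hs]
      have hih := ih _ hplt
      simp only [totw, List.map_cons, List.sum_cons] at *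
      rw [hih]

theorem totw_stkR' (hf wf : Nat → Int) (i : Nat) :
    totw wf (stkR hf i) = if 0 < i then cwR hf wf (i - 1) else 0 := by
  match i with
  | 0 => simp [stkR, totw]
  | i + 1 => simp [totw_stkR hf wf i]

theorem nseR_lb (hf : Nat → Int) (n i : Nat) : i < nseR hf n i := by
  have := nextLT_lb hf (hf i) (i + 1) (n - (i + 1)); unfold nseR; omega

theorem nseR_ub (hf : Nat → Int) (n i : Nat) (h : i < n) : nseR hf n i ≤ n := by
  have := nextLT_ub hf (hf i) (i + 1) (n - (i + 1)); unfold nseR; omega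

theorem nseR_lt (hf : Nat → Int) (n i : Nat) (h : nseR hf n i < n) :
    hf (nseR hf n i) < hf i := by
  rcases lt_or_ge i n with hin | hin
  · exact nextLT_lt hf (hf i) (i + 1) (n - (i + 1)) (by unfold nseR at *; omega)
  · have := nseR_lb hf n i; omega

theorem nseR_ge (hf : Nat → Int) (n i : Nat) (s : Nat) (h1 : i < s) (h2 : s < nseR hf n i) :
    hf i ≤ hf s := nextLT_ge hf (hf i) (i + 1) (n - (i + 1)) s h1 h2

theorem nseR_eq_of (hf : Nat → Int) (n i : Nat) (hin : i < n) (s : Nat)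
    (h1 : i < s) (h2 : s ≤ n)
    (hlt : s < n → hf s < hf i)
    (hge : ∀ r, i < r → r < s → hf i ≤ hf r) :
    nseR hf n i = s :=
  nextLT_eq_of hf (hf i) (i + 1) (n - (i + 1)) s h1 (by omega)
    (fun h => hlt (by omega)) (fun r hr1 hr2 => hge r (by omega) hr2)

/-- a board is still on the stack after all `n` steps iff its next-smaller pointer is `n`. -/
theorem mem_stkR_iff_nse (hf : Nat → Int) (n j : Nat) :
    j ∈ stkR hf n ↔ j < n ∧ nseR hf n j = n := by
  rw [mem_stkR]
  constructor
  · rintro ⟨hj, hall⟩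
    exact ⟨hj, nseR_eq_of hf n j hj n (by omega) (le_refl n) (by omega)
      (fun r h1 h2 => hall r h1 h2)⟩
  · rintro ⟨hj, hn⟩
    refine ⟨hj, fun k h1 h2 => ?_⟩
    exact nseR_ge hf n j k h1 (by omega)

/-- a board `j` gets popped exactly at step `nseR j` (when that is `< n`). -/
theorem pop_iff_nse (hf : Nat → Int) (n i j : Nat) (hin : i < n) :
    (j ∈ stkR hf i ∧ hf i < hf j) ↔ (j < i ∧ nseR hf n j = i) := by
  rw [mem_stkR]
  constructor
  · rintro ⟨⟨hj, hall⟩, hlt⟩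
    exact ⟨hj, nseR_eq_of hf n j (by omega) i hj (by omega) (fun _ => hlt)
      (fun r h1 h2 => hall r h1 h2)⟩
  · rintro ⟨hj, hn⟩
    refine ⟨⟨hj, fun k h1 h2 => nseR_ge hf n j k h1 (by omega)⟩, ?_⟩
    have := nseR_lt hf n j (by omega)
    rw [hn] at this; exact this

def pvMod : Int := 10 ^ 9 + 7

theorem pymod_eq (x : Int) : PySem.Int.mod x pvMod = x % pvMod :=
  PySem.Int.mod_eq_emod_of_pos (by norm_num [pvMod])

theorem modstep (S a b c ph : Int) :
    (S % pvMod + ((((0 + a) % pvMod + b) % pvMod + c) % pvMod) * ph) % pvMod = (S + (a + b + c) * ph) % pvMod := by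
  have h1 : (((0 + a) % pvMod + b) % pvMod + c) % pvMod = (a + b + c) % pvMod := by
    rw [zero_add, Int.emod_add_emod, add_assoc, Int.emod_add_emod, ← add_assoc]
  rw [h1]
  conv_rhs => rw [Int.add_emod, Int.mul_emod]
  conv_lhs => rw [Int.add_emod, Int.mul_emod, Int.emod_emod_of_dvd _ dvd_rfl,
    Int.emod_emod_of_dvd _ dvd_rfl]

/-- the `lw` value A stores with board `i`, in B's closed form. -/
def lwRef (hf wf : Nat → Int) (i : Nat) : Int :=
  (if 0 < i then cwR hf wf (i - 1) else 0) - (if 0 ≤ pseR hf i then cwR hf wf (pseR hf i).toNat else 0)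

/-- the accumulated `prw` at the moment board `i` is popped, in B's closed form. -/
def rwRef (hf wf : Nat → Int) (n i : Nat) : Int :=
  (if 0 < nseR hf n i then cwR hf wf (nseR hf n i - 1) else 0) - cwR hf wf i

def crossRef (hf wf : Nat → Int) (n i : Nat) : Int :=
  hf i * (lwRef hf wf i * wf i + wf i * rwRef hf wf n i + lwRef hf wf i * rwRef hf wf n i)

def contribR (hf wf : Nat → Int) (n i : Nat) : Int :=
  pvCalc (hf i) * pvCalc (wf i) + crossRef hf wf n i

def entR (hf wf : Nat → Int) (j : Nat) : Int × Int × Int := (hf j, wf j, lwRef hf wf j)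

/-- exact (unreduced) value accumulated by a pop/drain run over boards `T`. -/
def popSum (hf wf : Nat → Int) : List Nat → Int → Int
  | [], _ => 0
  | j :: T, prw =>
    hf j * (lwRef hf wf j * wf j + wf j * prw + lwRef hf wf j * prw) + popSum hf wf T (prw + wf j)

theorem totw_nil (wf : Nat → Int) : totw wf [] = 0 := rfl
theorem totw_cons (wf : Nat → Int) (a : Nat) (l : List Nat) : totw wf (a :: l) = wf a + totw wf l := by
  simp [totw]
theorem totw_append (wf : Nat → Int) (a b : List Nat) : totw wf (a ++ b) = totw wf a + totw wf b := by
  simp [totw]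

theorem totw_takeWhile_stkR (hf wf : Nat → Int) (i : Nat) :
    totw wf ((stkR hf i).takeWhile (fun j => decide (hf i < hf j))) = lwRef hf wf i := by
  have hsplit := List.takeWhile_append_dropWhile (p := fun j => decide (hf i < hf j)) (l := stkR hf i)
  have htot : totw wf (stkR hf i) =
      totw wf ((stkR hf i).takeWhile (fun j => decide (hf i < hf j))) +
      totw wf ((stkR hf i).dropWhile (fun j => decide (hf i < hf j))) := by
    conv_lhs => rw [← hsplit]
    exact totw_append wf _ _
  rw [totw_stkR'] at htot
  unfold lwRef
  rcases lt_or_ge (pseR hf i) 0 with hp | hp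
  · rw [drop_stkR_neg hf i hp, totw_nil] at htot
    rw [if_neg (show ¬ 0 ≤ pseR hf i by omega)]
    omega
  · rw [drop_stkR_pos hf i hp, totw_stkR] at htot
    rw [if_pos hp]
    omega

theorem pvPopA_run (hf wf : Nat → Int) (hval : Int) (T R : List Nat)
    (hT : ∀ j ∈ T, hval < hf j) (hR : ∀ r, R.head? = some r → hf r ≤ hval) :
    ∀ (S lw prw : Int),
    pvPopA pvMod hval ((T ++ R).map (entR hf wf)) (S % pvMod) lw prw =
      (R.map (entR hf wf), (S + popSum hf wf T prw) % pvMod, lw + totw wf T, prw + totw wf T) := by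
  induction T with
  | nil =>
    intro S lw prw
    cases R with
    | nil => simp [pvPopA, popSum, totw]
    | cons r R' =>
      have := hR r rfl
      simp [pvPopA, entR, popSum, totw, not_lt.mpr this]
  | cons j T ih =>
    intro S lw prw
    have hj : hval < hf j := hT j List.mem_cons_self
    simp only [List.cons_append, List.map_cons, pvPopA, entR, if_pos hj, pymod_eq]
    rw [modstep]
    rw [show S + (lwRef hf wf j * wf j + wf j * prw + lwRef hf wf j * prw) * hf j =
      (S + hf j * (lwRef hf wf j * wf j + wf j * prw + lwRef hf wf j * prw)) from by ring]
    rw [ih (fun k hk => hT k (List.mem_cons_of_mem j hk))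
      (S + hf j * (lwRef hf wf j * wf j + wf j * prw + lwRef hf wf j * prw)) (lw + wf j) (prw + wf j)]
    simp only [Prod.mk.injEq, popSum, totw_cons]
    refine ⟨trivial, ?_, by ring, by ring⟩
    exact congrArg (fun z => z % pvMod) (by ring)

theorem pvFinalA_run (hf wf : Nat → Int) (T : List Nat) :
    ∀ (S prw : Int),
    pvFinalA pvMod (T.map (entR hf wf)) (S % pvMod) prw = (S + popSum hf wf T prw) % pvMod := by
  induction T with
  | nil => intro S prw; simp [pvFinalA, popSum]
  | cons j T ih =>
    intro S prw
    simp only [List.map_cons, pvFinalA, entR, pymod_eq]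
    rw [modstep]
    rw [show S + (lwRef hf wf j * wf j + wf j * prw + lwRef hf wf j * prw) * hf j =
      (S + hf j * (lwRef hf wf j * wf j + wf j * prw + lwRef hf wf j * prw)) from by ring]
    rw [ih (S + hf j * (lwRef hf wf j * wf j + wf j * prw + lwRef hf wf j * prw)) (prw + wf j)]
    simp only [popSum]
    exact congrArg (fun z => z % pvMod) (by ring)

theorem nodup_mid_eq {j : Nat} : ∀ (d p u v : List Nat), (d ++ j :: u).Nodup →
    d ++ j :: u = p ++ j :: v → d = p ∧ u = v := by
  intro d
  induction d with
  | nil =>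
    intro p u v hn he
    cases p with
    | nil => simpa using he
    | cons q p' =>
      exfalso
      simp only [List.nil_append, List.cons_append, List.cons.injEq] at he
      obtain ⟨rfl, he⟩ := he
      have : j ∈ p' ++ j :: v := by simp
      rw [← he] at this
      simp at hn
      exact hn.1 this
  | cons a d' ih =>
    intro p u v hn he
    cases p with
    | nil =>
      exfalso
      simp only [List.cons_append, List.nil_append, List.cons.injEq] at he
      obtain ⟨rfl, he⟩ := he
      simp at hn
    | cons q p' =>
      simp only [List.cons_append, List.cons.injEq] at he
      obtain ⟨rfl, he⟩ := he
      have hn' : (d' ++ j :: u).Nodup := by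
        simp only [List.cons_append, List.nodup_cons] at hn
        exact hn.2
      obtain ⟨h1, h2⟩ := ih p' u v hn' he
      exact ⟨by rw [h1], h2⟩

/-- what a pop run over a segment `T` of the stack at step `i` is worth, closed form. -/
theorem popSum_seg (hf wf : Nat → Int) (i : Nat) (hi : 0 < i) :
    ∀ (T done R : List Nat), done ++ (T ++ R) = stkR hf i →
    popSum hf wf T (totw wf done) =
      (T.map (fun j => hf j * (lwRef hf wf j * wf j + wf j * (cwR hf wf (i - 1) - cwR hf wf j) +
        lwRef hf wf j * (cwR hf wf (i - 1) - cwR hf wf j)))).sum := by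
  intro T
  induction T with
  | nil => intro done R h; simp [popSum]
  | cons j T' ih =>
    intro done R hdec
    have hjmem : j ∈ stkR hf i := by rw [← hdec]; simp
    obtain ⟨pre, hpre⟩ := stkR_suffix hf i j hjmem
    have hsj : stkR hf (j + 1) = j :: (stkR hf j).dropWhile (fun k => decide (hf j < hf k)) := rfl
    have hdec' : done ++ j :: (T' ++ R) = stkR hf i := by simpa using hdec
    obtain ⟨hdp, htail⟩ := nodup_mid_eq done pre (T' ++ R)
      ((stkR hf j).dropWhile (fun k => decide (hf j < hf k)))
      (by rw [hdec']; exact stkR_nodup hf i) (by rw [hdec', hpre, hsj])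
    have hstk : stkR hf i = done ++ stkR hf (j + 1) := by rw [hpre, hdp]
    -- totw done = cwR (i-1) - cwR j
    have htd : totw wf done = cwR hf wf (i - 1) - cwR hf wf j := by
      have h1 : totw wf (stkR hf i) = totw wf done + totw wf (stkR hf (j + 1)) := by
        rw [hstk]; exact totw_append wf _ _
      rw [totw_stkR', if_pos hi, totw_stkR] at h1
      omega
    simp only [popSum, List.map_cons, List.sum_cons, htd]
    have hrec := ih (done ++ [j]) R (by simpa using hdec')
    rw [totw_append, htd] at hrec
    rw [show cwR hf wf (i - 1) - cwR hf wf j + totw wf [j] = cwR hf wf (i - 1) - cwR hf wf j + wf j from by simp [totw]] at hrec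
    rw [hrec]

theorem takeWhile_eq_filter_of_antitone (hf : Nat → Int) (x : Int) (l : List Nat)
    (hp : l.Pairwise (fun a b => hf b ≤ hf a)) :
    l.takeWhile (fun j => decide (x < hf j)) = l.filter (fun j => decide (x < hf j)) := by
  induction l with
  | nil => rfl
  | cons a l ih =>
    rcases List.pairwise_cons.mp hp with ⟨ha, hl⟩
    by_cases hc : x < hf a
    · rw [List.takeWhile_cons_of_pos (by simpa using hc), List.filter_cons_of_pos (by simpa using hc)]
      rw [ih hl]
    · rw [List.takeWhile_cons_of_neg (by simpa using hc), List.filter_cons_of_neg (by simpa using hc)]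
      symm
      rw [List.filter_eq_nil_iff]
      intro b hb
      have := ha b hb
      simp; omega

/-- the popped segment at step `i`, as a set: boards whose next-smaller index is `i`. -/
theorem mem_takeWhile_stkR (hf : Nat → Int) (n i : Nat) (hin : i < n) (j : Nat) :
    j ∈ (stkR hf i).takeWhile (fun k => decide (hf i < hf k)) ↔ j < i ∧ nseR hf n j = i := by
  rw [takeWhile_eq_filter_of_antitone hf (hf i) _ ((stkR_pairwise hf i).imp (fun h => h.2))]
  rw [List.mem_filter]
  rw [← pop_iff_nse hf n i j hin]
  simp

theorem sum_map_ite_eq_filter (f : Nat → Int) (P : Nat → Prop) [DecidablePred P] (l : List Nat) :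
    (l.map (fun j => if P j then f j else 0)).sum = ((l.filter (fun j => decide (P j))).map f).sum := by
  induction l with
  | nil => rfl
  | cons a l ih =>
    by_cases hc : P a <;> simp [hc, ih]

/-- sums over the popped segment can be re-indexed by the filter over `range i`. -/
theorem sum_takeWhile_eq_filter_range (hf : Nat → Int) (n i : Nat) (hin : i < n) (g : Nat → Int) :
    (((stkR hf i).takeWhile (fun k => decide (hf i < hf k))).map g).sum =
      (((List.range i).filter (fun j => decide (nseR hf n j = i))).map g).sum := by
  refine List.Perm.sum_eq (List.Perm.map g ?_)
  apply (List.perm_ext_iff_of_nodup ?_ ?_).mpr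
  · intro a
    rw [mem_takeWhile_stkR hf n i hin a]
    simp [List.mem_filter, List.mem_range]
  · exact ((stkR_nodup hf i).sublist (List.takeWhile_sublist _))
  · exact (List.nodup_range).filter _

def singleR (hf wf : Nat → Int) (j : Nat) : Int := pvCalc (hf j) * pvCalc (wf j)

/-- A's reduced accumulator after `m` main-loop iterations (exact value). -/
def SAcc (hf wf : Nat → Int) (n m : Nat) : Int :=
  ((List.range m).map (fun j => singleR hf wf j + if nseR hf n j < m then crossRef hf wf n j else 0)).sum

def TotalR (hf wf : Nat → Int) (n : Nat) : Int :=
  ((List.range n).map (fun j => singleR hf wf j + crossRef hf wf n j)).sum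

theorem crossRef_of_nse (hf wf : Nat → Int) (n i j : Nat) (h : nseR hf n j = i) (hi : 0 < i) :
    hf j * (lwRef hf wf j * wf j + wf j * (cwR hf wf (i - 1) - cwR hf wf j) +
      lwRef hf wf j * (cwR hf wf (i - 1) - cwR hf wf j)) = crossRef hf wf n j := by
  unfold crossRef rwRef
  rw [h, if_pos hi]

theorem SAcc_succ (hf wf : Nat → Int) (n m : Nat) :
    SAcc hf wf n (m + 1) = SAcc hf wf n m + singleR hf wf m +
      (((List.range m).filter (fun j => decide (nseR hf n j = m))).map (crossRef hf wf n)).sum := by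
  unfold SAcc
  rw [List.range_succ, List.map_append, List.sum_append]
  have hm := nseR_lb hf n m
  simp only [List.map_cons, List.map_nil, List.sum_cons, List.sum_nil,
    if_neg (show ¬ nseR hf n m < m + 1 by omega), add_zero]
  have hpt : ∀ j : Nat,
      singleR hf wf j + (if nseR hf n j < m + 1 then crossRef hf wf n j else 0) =
      (singleR hf wf j + if nseR hf n j < m then crossRef hf wf n j else 0) +
        (if nseR hf n j = m then crossRef hf wf n j else 0) := by
    intro j
    rcases lt_trichotomy (nseR hf n j) m with h | h | h
    · rw [if_pos (by omega), if_pos h, if_neg (by omega)]; ring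
    · rw [if_pos (by omega), if_neg (by omega), if_pos h]; ring
    · rw [if_neg (by omega), if_neg (by omega), if_neg (by omega)]; ring
  calc ((List.range m).map (fun j => singleR hf wf j + if nseR hf n j < m + 1 then crossRef hf wf n j else 0)).sum + singleR hf wf m
      = ((List.range m).map (fun j => (singleR hf wf j + if nseR hf n j < m then crossRef hf wf n j else 0) + (if nseR hf n j = m then crossRef hf wf n j else 0))).sum + singleR hf wf m := by
        rw [List.map_congr_left (fun j _ => hpt j)]
    _ = _ := by
        rw [List.sum_map_add, sum_map_ite_eq_filter (crossRef hf wf n) (fun j => nseR hf n j = m)]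
        ring

/-- one main-loop iteration of A, indexed over `Nat`. -/
def stepAN (hf wf : Nat → Int) (s : Int × List (Int × Int × Int)) (k : Nat) : Int × List (Int × Int × Int) :=
  let h := hf k
  let w := wf k
  let res := PySem.Int.mod (s.1 + pvCalc h * pvCalc w) pvMod
  let t := pvPopA pvMod h s.2 res 0 0
  (t.2.1, (h, w, t.2.2.1) :: t.1)

theorem foldA (hf wf : Nat → Int) (n : Nat) :
    ∀ m, m ≤ n → (List.range m).foldl (stepAN hf wf) (0, []) =
      (SAcc hf wf n m % pvMod, (stkR hf m).map (entR hf wf)) := by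
  intro m
  induction m with
  | zero => intro _; simp [SAcc, stkR]
  | succ m ih =>
    intro hm
    rw [List.range_succ, List.foldl_append, ih (by omega), List.foldl_cons, List.foldl_nil]
    unfold stepAN
    dsimp only
    have hres : PySem.Int.mod (SAcc hf wf n m % pvMod + pvCalc (hf m) * pvCalc (wf m)) pvMod =
        (SAcc hf wf n m + singleR hf wf m) % pvMod := by
      rw [pymod_eq, Int.emod_add_emod]; rfl
    rw [hres]
    have hsplit : stkR hf m =
        (stkR hf m).takeWhile (fun k => decide (hf m < hf k)) ++
        (stkR hf m).dropWhile (fun k => decide (hf m < hf k)) :=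
      (List.takeWhile_append_dropWhile).symm
    set T := (stkR hf m).takeWhile (fun k => decide (hf m < hf k)) with hTdef
    set R := (stkR hf m).dropWhile (fun k => decide (hf m < hf k)) with hRdef
    have hT : ∀ j ∈ T, hf m < hf j := by
      intro j hj
      have := List.mem_takeWhile_imp hj
      simpa using this
    have hR : ∀ r, R.head? = some r → hf r ≤ hf m := by
      intro r hr
      have := List.head?_dropWhile_not (fun k => decide (hf m < hf k)) (stkR hf m)
      rw [← hRdef, hr] at this
      simpa using this
    conv_lhs => rw [hsplit]
    rw [List.map_append] at *
    rw [show (T.map (entR hf wf) ++ R.map (entR hf wf)) = (T ++ R).map (entR hf wf) from (List.map_append).symm]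
    rw [pvPopA_run hf wf (hf m) T R hT hR (SAcc hf wf n m + singleR hf wf m) 0 0]
    have hpop : popSum hf wf T 0 =
        (((List.range m).filter (fun j => decide (nseR hf n j = m))).map (crossRef hf wf n)).sum := by
      rcases Nat.eq_zero_or_pos m with rfl | hm0
      · have : T = [] := by rw [hTdef]; simp [stkR]
        rw [this]; simp [popSum]
      · have hseg := popSum_seg hf wf m hm0 T [] R (by simpa using hsplit.symm)
        rw [show totw wf [] = 0 from rfl] at hseg
        rw [hseg]
        rw [List.map_congr_left (fun j hj => crossRef_of_nse hf wf n m j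
          ((mem_takeWhile_stkR hf n m (by omega) j).mp hj).2 hm0)]
        exact sum_takeWhile_eq_filter_range hf n m (by omega) (crossRef hf wf n)
    rw [hpop]
    simp only [Prod.mk.injEq]
    constructor
    · rw [← SAcc_succ]
    · show (hf m, wf m, 0 + totw wf T) :: R.map (entR hf wf) = (stkR hf (m + 1)).map (entR hf wf)
      rw [show stkR hf (m + 1) = m :: R from rfl, List.map_cons]
      rw [zero_add, totw_takeWhile_stkR]
      rfl

theorem sum_stkR_eq_filter_range (hf : Nat → Int) (n : Nat) (g : Nat → Int) :
    ((stkR hf n).map g).sum =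
      (((List.range n).filter (fun j => decide (nseR hf n j = n))).map g).sum := by
  refine List.Perm.sum_eq (List.Perm.map g ?_)
  apply (List.perm_ext_iff_of_nodup (stkR_nodup hf n) ((List.nodup_range).filter _)).mpr
  intro a
  rw [mem_stkR_iff_nse]
  simp [List.mem_filter, List.mem_range]

theorem A_total (hf wf : Nat → Int) (n : Nat) :
    pvFinalA pvMod ((stkR hf n).map (entR hf wf)) (SAcc hf wf n n % pvMod) 0 = TotalR hf wf n % pvMod := by
  rw [pvFinalA_run hf wf (stkR hf n) (SAcc hf wf n n) 0]
  congr 1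
  have hpop : popSum hf wf (stkR hf n) 0 =
      (((List.range n).filter (fun j => decide (nseR hf n j = n))).map (crossRef hf wf n)).sum := by
    rcases Nat.eq_zero_or_pos n with rfl | hn0
    · simp [stkR, popSum]
    · have hseg := popSum_seg hf wf n hn0 (stkR hf n) [] [] (by simp)
      rw [show totw wf [] = 0 from rfl] at hseg
      rw [hseg]
      rw [List.map_congr_left (fun j hj => crossRef_of_nse hf wf n n j
        ((mem_stkR_iff_nse hf n j).mp hj).2 hn0)]
      exact sum_stkR_eq_filter_range hf n (crossRef hf wf n)
  rw [hpop]
  unfold TotalR SAcc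
  rw [← sum_map_ite_eq_filter (crossRef hf wf n) (fun j => nseR hf n j = n), ← List.sum_map_add]
  apply congrArg
  apply List.map_congr_left
  intro j hj
  rw [List.mem_range] at hj
  have h1 := nseR_ub hf n j hj
  rcases lt_or_eq_of_le h1 with h | h
  · rw [if_pos h, if_neg (by omega)]; ring
  · rw [if_neg (by omega), if_pos h]; ring

theorem fancy_fence_eq_total (N : Int) (h_a w_a : List Int) :
    fancy_fence N h_a w_a =
      TotalR (fun k => PySem.List.pyGetD h_a ((k : Nat) : Int) 0)
        (fun k => PySem.List.pyGetD w_a ((k : Nat) : Int) 0) N.toNat % pvMod := by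
  unfold fancy_fence
  dsimp only
  rw [PySem.List.pyRange_one, List.foldl_map]
  have hfun : (fun (s : Int × List (Int × Int × Int)) (k : Nat) =>
      (fun i =>
        let h := PySem.List.pyGetD h_a i 0
        let w := PySem.List.pyGetD w_a i 0
        let res := PySem.Int.mod (s.1 + pvCalc h * pvCalc w) (10 ^ 9 + 7)
        let t := pvPopA (10 ^ 9 + 7) h s.2 res 0 0
        (t.2.1, (h, w, t.2.2.1) :: t.1)) ((0 : Int) + (k : Int))) =
      (fun s k => stepAN (fun k => PySem.List.pyGetD h_a ((k : Nat) : Int) 0)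
        (fun k => PySem.List.pyGetD w_a ((k : Nat) : Int) 0) s k) := by
    funext s k
    simp only [zero_add]
    rfl
  rw [show ((N - 0).toNat) = N.toNat from by rw [sub_zero]]
  rw [show (fun (s : Int × List (Int × Int × Int)) (k : Nat) =>
        (fun i =>
          let h := PySem.List.pyGetD h_a i 0
          let w := PySem.List.pyGetD w_a i 0
          let res := PySem.Int.mod (s.1 + pvCalc h * pvCalc w) (10 ^ 9 + 7)
          let t := pvPopA (10 ^ 9 + 7) h s.2 res 0 0
          (t.2.1, (h, w, t.2.2.1) :: t.1)) ((0 : Int) + (k : Int))) =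
      (fun s k => stepAN (fun k => PySem.List.pyGetD h_a ((k : Nat) : Int) 0)
        (fun k => PySem.List.pyGetD w_a ((k : Nat) : Int) 0) s k) from hfun]
  rw [foldA _ _ N.toNat N.toNat (le_refl _)]
  exact A_total _ _ N.toNat

-- ===== B-side: pointer-jump and fold correctness =====
theorem read_map_range (f : Nat → Int) (m k : Nat) (hk : k < m) :
    PySem.List.pyGetD ((List.range m).map f) ((k : Nat) : Int) 0 = f k := by
  rw [PySem.List.pyGetD_natCast]
  exact PySem.List.getD_map_range f m k 0 hk

theorem getD_set' (l : List Int) (i k : Nat) (v : Int) (hi : i < l.length) :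
    (l.set i v).getD k 0 = if k = i then v else l.getD k 0 := by
  rcases Nat.lt_or_ge k l.length with h | h
  · simp only [List.getD_eq_getElem?_getD, List.getElem?_set, hi]
    by_cases hik : k = i
    · simp [hik]
    · simp [hik, Ne.symm hik]
  · rw [if_neg (by omega)]
    simp [List.getD_eq_getElem?_getD, List.getElem?_eq_none (by simpa using h),
      List.getElem?_eq_none (l := l.set i v) (by simpa using h)]

theorem pvJumpDown_eq (hL P : List Int) (hf : Nat → Int) (n m : Nat) (hm : m < n)
    (hreadH : ∀ k : Nat, k < n → PySem.List.pyGetD hL ((k : Nat) : Int) 0 = hf k)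
    (hreadP : ∀ k : Nat, k < m → PySem.List.pyGetD P ((k : Nat) : Int) 0 = pseR hf k) :
    ∀ (fuel : Nat) (j : Int), -1 ≤ j → j < (m : Int) →
    (∀ k : Nat, j < (k : Int) → k < m → hf m < hf k) →
    (j + 2).toNat ≤ fuel →
    pvJumpDown hL P (hf m) fuel j = pseR hf m := by
  intro fuel
  induction fuel with
  | zero => intro j h1 _ _ hfuel; omega
  | succ fuel ih =>
    intro j h1 h2 hreg hfuel
    simp only [pvJumpDown]
    by_cases hj0 : 0 ≤ j
    · have hjn : j = ((j.toNat : Nat) : Int) := by omega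
      have hjm : j.toNat < m := by omega
      rw [hjn, hreadH j.toNat (by omega)]
      by_cases hc : hf m < hf j.toNat
      · rw [if_pos ⟨by omega, by simpa using hc⟩]
        rw [hreadP j.toNat hjm]
        have hple := prevLE_neg_one_le hf (hf j.toNat) j.toNat
        have hplt := prevLE_lt hf (hf j.toNat) j.toNat
        apply ih (pseR hf j.toNat) (by unfold pseR; omega) (by unfold pseR; omega) ?_ (by unfold pseR; omega)
        intro k hk1 hk2
        rcases Nat.lt_trichotomy k j.toNat with h | h | h
        · have := prevLE_gt hf (hf j.toNat) j.toNat k (by unfold pseR at hk1; omega) h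
          omega
        · subst h; exact hc
        · exact hreg k (by omega) hk2
      · rw [if_neg (by rintro ⟨_, hgt⟩; simp at hgt; omega)]
        rw [← hjn]
        symm
        apply prevLE_eq_of hf (hf m) m j h1 h2
        · intro _; rw [show j.toNat = j.toNat from rfl]; omega
        · exact fun k hk1 hk2 => hreg k hk1 hk2
    · rw [if_neg (by rintro ⟨hge, _⟩; omega)]
      symm
      apply prevLE_eq_of hf (hf m) m j h1 h2
      · intro h; omega
      · exact fun k hk1 hk2 => hreg k hk1 hk2

theorem pvJumpUp_eq (hL Q : List Int) (hf : Nat → Int) (n i : Nat) (hin : i < n)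
    (hreadH : ∀ k : Nat, k < n → PySem.List.pyGetD hL ((k : Nat) : Int) 0 = hf k)
    (hreadQ : ∀ k : Nat, i < k → k < n → PySem.List.pyGetD Q ((k : Nat) : Int) 0 = (nseR hf n k : Int)) :
    ∀ (fuel : Nat) (t : Nat), i < t → t ≤ n →
    (∀ s : Nat, i < s → s < t → hf i ≤ hf s) →
    n - t + 1 ≤ fuel →
    pvJumpUp hL Q (n : Int) (hf i) fuel (t : Int) = (nseR hf n i : Int) := by
  intro fuel
  induction fuel with
  | zero => intro t _ _ _ hfuel; omega
  | succ fuel ih =>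
    intro t ht1 ht2 hreg hfuel
    simp only [pvJumpUp]
    by_cases htn : t < n
    · rw [hreadH t htn]
      by_cases hc : hf i ≤ hf t
      · rw [if_pos ⟨by exact_mod_cast htn, by simpa using hc⟩]
        rw [hreadQ t ht1 htn]
        have hlb := nseR_lb hf n t
        have hub := nseR_ub hf n t htn
        apply ih (nseR hf n t) (by omega) hub ?_ (by omega)
        intro s hs1 hs2
        rcases Nat.lt_trichotomy s t with h | h | h
        · exact hreg s hs1 h
        · subst h; exact hc
        · exact le_trans hc (nseR_ge hf n t s h hs2)
      · rw [if_neg (by rintro ⟨_, hge⟩; simp at hge; omega)]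
        exact_mod_cast congrArg (fun x : Nat => (x : Int))
          (nseR_eq_of hf n i hin t ht1 ht2 (fun _ => by omega) hreg).symm
    · rw [if_neg (by rintro ⟨hlt, _⟩; exact absurd (by exact_mod_cast hlt) htn)]
      exact_mod_cast congrArg (fun x : Nat => (x : Int))
        (nseR_eq_of hf n i hin t ht1 ht2 (fun h => absurd h (by omega)) hreg).symm

theorem pseFold (hf : Nat → Int) (n : Nat) :
    ∀ m, m ≤ n →
    ((List.range m).foldl (fun pse k => pse ++ [pvJumpDown ((List.range n).map hf) pse
        (PySem.List.pyGetD ((List.range n).map hf) ((k : Nat) : Int) 0)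
        (n + 2) ((k : Nat) - 1)]) []) =
      (List.range m).map (pseR hf) := by
  intro m
  induction m with
  | zero => intro _; simp
  | succ m ih =>
    intro hm
    rw [List.range_succ, List.foldl_append, ih (by omega), List.foldl_cons, List.foldl_nil,
      List.map_append]
    congr 1
    rw [read_map_range hf n m (by omega)]
    simp only [List.map_cons, List.map_nil]
    congr 1
    apply pvJumpDown_eq ((List.range n).map hf) ((List.range m).map (pseR hf)) hf n m (by omega)
      (fun k hk => read_map_range hf n k hk)
      (fun k hk => read_map_range (pseR hf) m k hk)
      (n + 2) ((m : Int) - 1) (by omega) (by omega)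
      (fun k hk1 hk2 => by omega)
      (by omega)

theorem nseFoldAux (hf : Nat → Int) (n : Nat) :
    ∀ a : Nat, a ≤ n → ∀ Q : List Int, Q.length = n →
    (∀ k : Nat, k < n → Q.getD k 0 = if a ≤ k then (nseR hf n k : Int) else 0) →
    (((PySem.List.pyRange ((a : Int) - 1) (-1) (-1)).foldl (fun nse i =>
        PySem.List.pySetD nse i (pvJumpUp ((List.range n).map hf) nse ((n : Nat) : Int)
          (PySem.List.pyGetD ((List.range n).map hf) i 0)
          (n + 2) (i + 1))) Q).length = n ∧
      ∀ k : Nat, k < n → ((PySem.List.pyRange ((a : Int) - 1) (-1) (-1)).foldl (fun nse i =>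
        PySem.List.pySetD nse i (pvJumpUp ((List.range n).map hf) nse ((n : Nat) : Int)
          (PySem.List.pyGetD ((List.range n).map hf) i 0)
          (n + 2) (i + 1))) Q).getD k 0 = (nseR hf n k : Int)) := by
  intro a
  induction a with
  | zero =>
    intro _ Q hlen hchar
    rw [PySem.List.pyRange_neg_one_eq_nil (by norm_num)]
    exact ⟨hlen, fun k hk => by simpa using hchar k hk⟩
  | succ a ih =>
    intro ha Q hlen hchar
    have hcons : PySem.List.pyRange (((a + 1 : Nat) : Int) - 1) (-1) (-1) =
        ((a : Nat) : Int) :: PySem.List.pyRange (((a : Nat) : Int) - 1) (-1) (-1) := by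
      push_cast
      rw [show (a : Int) + 1 - 1 = (a : Int) from by ring]
      exact PySem.List.pyRange_neg_one_cons (by omega)
    rw [hcons, List.foldl_cons]
    have hread := read_map_range hf n a (by omega)
    rw [hread]
    have hjump : pvJumpUp ((List.range n).map hf) Q ((n : Nat) : Int) (hf a)
        (n + 2) (((a : Nat) : Int) + 1) = (nseR hf n a : Int) := by
      have := pvJumpUp_eq ((List.range n).map hf) Q hf n a (by omega)
        (fun k hk => read_map_range hf n k hk)
        (fun k hk1 hk2 => by
          rw [PySem.List.pyGetD_natCast, hchar k hk2, if_pos (by omega)])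
        (n + 2) (a + 1) (by omega) (by omega)
        (fun s hs1 hs2 => by omega)
        (by omega)
      rw [show ((a : Nat) : Int) + 1 = (((a + 1 : Nat)) : Int) from by push_cast; ring]
      exact this
    rw [hjump]
    rw [show PySem.List.pySetD Q ((a : Nat) : Int) (nseR hf n a : Int) = Q.set a (nseR hf n a : Int) from by simp]
    apply ih (by omega) (Q.set a (nseR hf n a : Int)) (by simpa using hlen)
    intro k hk
    rw [getD_set' Q a k _ (by omega)]
    by_cases hka : k = a
    · subst hka; rw [if_pos rfl, if_pos (le_refl _)]
    · rw [if_neg hka, hchar k hk]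
      by_cases hle : a + 1 ≤ k
      · rw [if_pos (by omega), if_pos (by omega)]
      · rw [if_neg (by omega), if_neg (by omega)]

theorem cumwFold (hf wf : Nat → Int) (n : Nat) :
    ∀ m, m ≤ n →
    ((List.range m).foldl (fun cumw k =>
      cumw ++ [PySem.List.pyGetD ((List.range n).map wf) ((k : Nat) : Int) 0 +
        (if PySem.List.pyGetD ((List.range n).map (pseR hf)) ((k : Nat) : Int) 0 ≥ 0 then
          PySem.List.pyGetD cumw (PySem.List.pyGetD ((List.range n).map (pseR hf)) ((k : Nat) : Int) 0) 0
        else 0)]) []) = (List.range m).map (cwR hf wf) := by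
  intro m
  induction m with
  | zero => intro _; simp
  | succ m ih =>
    intro hm
    rw [List.range_succ, List.foldl_append, ih (by omega), List.foldl_cons, List.foldl_nil,
      List.map_append]
    congr 1
    rw [read_map_range wf n m (by omega), read_map_range (pseR hf) n m (by omega)]
    simp only [List.map_cons, List.map_nil]
    congr 1
    rw [cwR]
    rcases lt_or_ge (pseR hf m) 0 with hp | hp
    · rw [if_neg (by omega), dif_neg (by omega)]
    · rw [if_pos (by omega), dif_pos hp]
      congr 1
      rw [show pseR hf m = (((pseR hf m).toNat : Nat) : Int) from by omega]
      have := pseR_lt hf m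
      rw [read_map_range (cwR hf wf) m (pseR hf m).toNat (by omega)]
      exact congrArg (cwR hf wf) (by omega)

theorem foldl_add_sum (g : Nat → Int) : ∀ (l : List Nat) (init : Int),
    l.foldl (fun r k => r + g k) init = init + (l.map g).sum := by
  intro l
  induction l with
  | nil => intro init; simp
  | cons a l ih => intro init; simp [ih]; ring

theorem foldl_pyRange_range {β : Type} (f : β → Int → β) (init : β) (n : Nat) :
    (PySem.List.pyRange 0 ((n : Nat) : Int) 1).foldl f init =
      (List.range n).foldl (fun s k => f s ((k : Nat) : Int)) init := by
  rw [PySem.List.pyRange_one, List.foldl_map]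
  simp only [sub_zero, Int.toNat_natCast, zero_add]

theorem fancy_fence_alt_eq_total (N : Int) (h_a w_a : List Int) :
    fancy_fence_alt N h_a w_a =
      TotalR (fun k => PySem.List.pyGetD h_a ((k : Nat) : Int) 0)
        (fun k => PySem.List.pyGetD w_a ((k : Nat) : Int) 0) N.toNat % pvMod := by
  unfold fancy_fence_alt
  dsimp only
  rw [show (PySem.List.pyRange 0 N 1).map (fun i => PySem.List.pyGetD h_a i 0) =
      (List.range N.toNat).map (fun k => PySem.List.pyGetD h_a ((k : Nat) : Int) 0) from by
    rw [PySem.List.pyRange_one, List.map_map]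
    simp only [sub_zero, Function.comp_def, zero_add]]
  rw [show (PySem.List.pyRange 0 N 1).map (fun i => PySem.List.pyGetD w_a i 0) =
      (List.range N.toNat).map (fun k => PySem.List.pyGetD w_a ((k : Nat) : Int) 0) from by
    rw [PySem.List.pyRange_one, List.map_map]
    simp only [sub_zero, Function.comp_def, zero_add]]
  generalize (fun k : Nat => PySem.List.pyGetD h_a ((k : Nat) : Int) 0) = hf
  generalize (fun k : Nat => PySem.List.pyGetD w_a ((k : Nat) : Int) 0) = wf
  generalize N.toNat = n
  simp only [List.length_map, List.length_range]
  rw [show ((n : Nat) : Int) = (((n : Nat) : Int)) from rfl]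
  simp only [foldl_pyRange_range]
  rw [pseFold hf n n (le_refl n)]
  rw [cumwFold hf wf n n (le_refl n)]
  obtain ⟨hlenN, hcharN⟩ := nseFoldAux hf n n (le_refl n) (List.replicate n 0) (by simp)
    (fun k hk => by rw [if_neg (by omega)]; simp)
  rw [PySem.List.foldl_congr_mem (List.range n) _
    (fun s k => s + (singleR hf wf k + crossRef hf wf n k)) 0 ?_]
  · rw [foldl_add_sum, zero_add, show ((10:Int) ^ 9 + 7) = pvMod from rfl, pymod_eq]
    rfl
  · intro acc k hk
    rw [List.mem_range] at hk
    have hnse := hcharN k hk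
    have hlb := nseR_lb hf n k
    have hub := nseR_ub hf n k hk
    rw [read_map_range hf n k hk, read_map_range wf n k hk, read_map_range (pseR hf) n k hk,
      read_map_range (cwR hf wf) n k hk]
    rw [PySem.List.pyGetD_natCast, hnse]
    rw [if_pos (show ((nseR hf n k : Nat) : Int) > 0 by omega)]
    rw [show ((nseR hf n k : Nat) : Int) - 1 = (((nseR hf n k - 1 : Nat)) : Int) from by omega]
    rw [read_map_range (cwR hf wf) n (nseR hf n k - 1) (by omega)]
    simp only [singleR, crossRef, lwRef, rwRef]
    rw [if_pos (show 0 < nseR hf n k by omega)]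
    by_cases hk0 : 0 < k
    · rw [if_pos (show ((k : Nat) : Int) > 0 by omega), if_pos hk0]
      rw [show ((k : Nat) : Int) - 1 = (((k - 1 : Nat)) : Int) from by omega]
      rw [read_map_range (cwR hf wf) n (k - 1) (by omega)]
      by_cases hp : 0 ≤ pseR hf k
      · rw [if_pos (show pseR hf k ≥ 0 by omega), if_pos hp]
        rw [show pseR hf k = (((pseR hf k).toNat : Nat) : Int) from by omega]
        rw [read_map_range (cwR hf wf) n (pseR hf k).toNat (by have := pseR_lt hf k; omega)]
        rw [show ((((pseR hf k).toNat : Nat) : Int)).toNat = (pseR hf k).toNat from by omega]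
        ring
      · rw [if_neg (show ¬ pseR hf k ≥ 0 by omega), if_neg hp]
        ring
    · rw [if_neg (show ¬ ((k : Nat) : Int) > 0 by omega), if_neg hk0]
      have hpneg : pseR hf k < 0 := by have := pseR_lt hf k; omega
      rw [if_neg (show ¬ pseR hf k ≥ 0 by omega), if_neg (show ¬ 0 ≤ pseR hf k by omega)]
      ring

-- ===== VERDICT (by name: the statement is the Claim_ definition above) =====
theorem fancy_fence_spec : Claim_equal_fancy_fence := by
  intro N h_a w_a _ _
  unfold Spec_fancy_fence
  rw [fancy_fence_eq_total, fancy_fence_alt_eq_total]
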